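-- pv_equiv track=rewrite | github.com/jantzeca/ParallelLinter | Linters/ParallelLinter.py | fix_line_numbers
-- ===== SOURCE A (Python) =====
-- def fix_line_numbers(exp_list, expression):
--     line_number = 0
--     new_lines = []
--     for i in expression:
--         for char in i:
--             if char is "\n":
--                 line_number += 1
--         new_lines.append(line_number)
--     for index, i in enumerate(exp_list):
--         if index != 0:
--             for j in i:
--                 j[1] += new_lines[index - 1]
--     return exp_list
-- ===== SOURCE B (Python) =====
-- def fix_line_numbers(exp_list, expression):
--     offset = 0
--     consumed = 0
--     for index in range(1, len(exp_list)):
--         group = exp_list[index]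
--         if group:
--             while consumed < index:
--                 offset += expression[consumed].count("\n")
--                 consumed += 1
--             for j in group:
--                 j[1] += offset
--     return exp_list
-- ===== Notes on version B (the rewrite author's own statement) =====
-- stated objective: alternative
-- what changed: B builds no new_lines list at all: it fuses the two phases into one pass over the group indices, keeping a running offset and a lazy cursor into expression that is advanced (summing per-chunk newline counts via str.count on demand) only when a nonempty group actually needs its offset.
import Mathlib
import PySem

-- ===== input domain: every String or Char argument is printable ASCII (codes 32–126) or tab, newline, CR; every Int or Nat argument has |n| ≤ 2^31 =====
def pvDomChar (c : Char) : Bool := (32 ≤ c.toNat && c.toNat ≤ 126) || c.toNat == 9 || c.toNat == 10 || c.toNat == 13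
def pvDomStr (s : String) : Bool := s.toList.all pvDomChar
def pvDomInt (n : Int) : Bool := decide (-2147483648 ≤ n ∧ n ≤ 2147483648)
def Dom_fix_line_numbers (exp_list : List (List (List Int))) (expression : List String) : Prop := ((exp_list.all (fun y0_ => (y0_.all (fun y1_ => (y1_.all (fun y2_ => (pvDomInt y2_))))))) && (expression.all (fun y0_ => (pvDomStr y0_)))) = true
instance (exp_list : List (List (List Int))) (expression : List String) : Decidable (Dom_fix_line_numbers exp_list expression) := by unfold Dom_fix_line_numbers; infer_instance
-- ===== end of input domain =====

-- B fuses A's two phases into one pass: no new_lines list is built; a running offset and a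
-- lazy cursor into expression advance on demand only when a nonempty group needs its offset.
-- Both Pythons mutate the inner lists of exp_list in place and return the same object; the
-- equivalence proved here is about the return value.


-- ===== PORT A =====
-- `j[1] += new_lines[index-1]` is ported with the total forms pyGetD/pySetD; Pre_ keeps
-- exactly the inputs where Python's indexing succeeds.
def fix_line_numbers (exp_list : List (List (List Int))) (expression : List String) : List (List (List Int)) :=
  let new_lines : List Int :=
    (expression.foldl
      (fun (st : Int × List Int) i =>
        let line_number := i.toList.foldl (fun ln char => if char == '\n' then ln + 1 else ln) st.1
        (line_number, st.2 ++ [line_number]))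
      (0, [])).2
  exp_list.zipIdx.map (fun p =>
    if p.2 = 0 then p.1
    else p.1.map (fun j =>
      PySem.List.pySetD j 1 (PySem.List.pyGetD j 1 0 + PySem.List.pyGetD new_lines ((p.2 : Int) - 1) 0)))

-- ===== PORT B =====
-- B's `while consumed < index: offset += expression[consumed].count("\n"); consumed += 1`
def pvAdvance (expression : List String) (offset consumed idx : Int) : Int × Int :=
  if _h : consumed < idx then
    pvAdvance expression (offset + (PySem.Str.count (PySem.List.pyGetD expression consumed "") "\n" : Int)) (consumed + 1) idx
  else (offset, consumed)
termination_by (idx - consumed).toNat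
decreasing_by omega

-- one iteration of B's for-index loop; state = (offset, consumed, the mutated exp_list)
def pvStepB (expression : List String) (st : Int × Int × List (List (List Int))) (index : Int) : Int × Int × List (List (List Int)) :=
  let group := PySem.List.pyGetD st.2.2 index []
  if group.isEmpty then st
  else
    let oc := pvAdvance expression st.1 st.2.1 index
    (oc.1, oc.2, PySem.List.pySetD st.2.2 index (group.map (fun j =>
      PySem.List.pySetD j 1 (PySem.List.pyGetD j 1 0 + oc.1))))

def fix_line_numbers_alt (exp_list : List (List (List Int))) (expression : List String) : List (List (List Int)) :=
  ((PySem.List.pyRange 1 (exp_list.length : Int) 1).foldl (pvStepB expression) (0, 0, exp_list)).2.2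

-- ===== PRECONDITION & SPEC =====
-- Pre_ = exactly the inputs where Python A returns: every nonempty group at index ≥ 1 needs
-- new_lines[index-1] in range and every entry j there needs j[1] in range (else IndexError).
def Pre_fix_line_numbers (exp_list : List (List (List Int))) (expression : List String) : Prop :=
  ∀ i, (hi : i < exp_list.length) → 1 ≤ i → exp_list[i] ≠ [] →
    (i - 1 < expression.length ∧ ∀ j ∈ exp_list[i], 2 ≤ j.length)
instance (exp_list : List (List (List Int))) (expression : List String) : Decidable (Pre_fix_line_numbers exp_list expression) := by unfold Pre_fix_line_numbers; infer_instance
def pvWitness_fix_line_numbers : List (List (List Int)) × List String :=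
  ([[[1, 2]], [[3, 4], [5, 6]], [[7, 8]]], ["a\nb", "\n\n", "c"])
def Spec_fix_line_numbers (exp_list : List (List (List Int))) (expression : List String) (out : List (List (List Int))) : Prop := out = fix_line_numbers_alt exp_list expression
instance (exp_list : List (List (List Int))) (expression : List String) (out : List (List (List Int))) : Decidable (Spec_fix_line_numbers exp_list expression out) := by unfold Spec_fix_line_numbers; infer_instance

-- ===== CLAIM (what is proved, stated in full; the proofs are below) =====
def Claim_equal_fix_line_numbers : Prop := ∀ (exp_list : List (List (List Int))) (expression : List String), Dom_fix_line_numbers exp_list expression → Pre_fix_line_numbers exp_list expression → Spec_fix_line_numbers exp_list expression (fix_line_numbers exp_list expression)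

-- ===== LEMMAS AND PROOFS =====

-- newline count of chunk t of expression, summed over t < n (total via getD)
def pvPref (es : List String) : ℕ → Int
  | 0 => 0
  | n + 1 => pvPref es n + ((es.getD n "").toList.count '\n' : Int)

def pvUpd (o : Int) (j : List Int) : List Int :=
  PySem.List.pySetD j 1 (PySem.List.pyGetD j 1 0 + o)

-- exp_list with groups at 1 ≤ i < k already offset by pvPref i
def pvTgt (es : List String) (el : List (List (List Int))) (k : ℕ) : List (List (List Int)) :=
  el.zipIdx.map (fun p => if p.2 = 0 ∨ k ≤ p.2 then p.1 else p.1.map (pvUpd (pvPref es p.2)))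

-- the cumulative newline counts A's phase 1 computes
def pvCum (s : Int) : List String → List Int
  | [] => []
  | c :: rest => (s + (c.toList.count '\n' : Int)) :: pvCum (s + (c.toList.count '\n' : Int)) rest

theorem pvCount_go_single (c : Char) : ∀ (l : List Char) (fuel acc : ℕ), l.length ≤ fuel →
    PySem.Chars.count.go [c] fuel l acc = acc + l.count c := by
  intro l
  induction l with
  | nil => intro fuel acc _; cases fuel <;> simp [PySem.Chars.count.go]
  | cons h t ih =>
    intro fuel acc hle
    cases fuel with
    | zero => simp at hle
    | succ fuel =>
      by_cases hc : h = c
      · subst hc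
        simpa [PySem.Chars.count.go, List.count_cons, Nat.add_comm, Nat.add_left_comm] using
          ih fuel (acc + 1) (by simpa using hle)
      · have : ([c].isPrefixOf (h :: t)) = false := by
          simp [List.isPrefixOf, Ne.symm hc]
        simp only [PySem.Chars.count.go, this, Bool.false_eq_true, if_false]
        rw [ih fuel acc (by simpa using hle)]
        simp [hc]

theorem pvCount_single (cs : List Char) (c : Char) :
    PySem.Chars.count cs [c] = cs.count c := by
  simp [PySem.Chars.count, pvCount_go_single c cs cs.length 0 le_rfl]

theorem pvStrCount_newline (s : String) :
    PySem.Str.count s "\n" = s.toList.count '\n' := by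
  rw [PySem.Str.count_eq]
  have : ("\n" : String).toList = ['\n'] := rfl
  rw [this, pvCount_single]

-- A's phase 1
theorem pvA1 : ∀ (es : List String) (s : Int) (acc : List Int),
    (es.foldl
      (fun (st : Int × List Int) i =>
        let line_number := i.toList.foldl (fun ln char => if char == '\n' then ln + 1 else ln) st.1
        (line_number, st.2 ++ [line_number]))
      (s, acc)).2 = acc ++ pvCum s es := by
  intro es
  induction es with
  | nil => intro s acc; simp [pvCum]
  | cons c rest ih =>
    intro s acc
    simp only [List.foldl_cons]
    rw [PySem.List.foldl_beq_add_one]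
    rw [ih]
    simp [pvCum]

theorem pvPref_cons (c : String) (rest : List String) :
    ∀ m, pvPref (c :: rest) (m + 1) = (c.toList.count '\n' : Int) + pvPref rest m := by
  intro m
  induction m with
  | zero => simp [pvPref]
  | succ m ih =>
    rw [show pvPref (c :: rest) (m + 1 + 1)
        = pvPref (c :: rest) (m + 1) + (((c :: rest).getD (m + 1) "").toList.count '\n' : Int) from rfl]
    rw [ih, List.getD_cons_succ]
    rw [show pvPref rest (m + 1) = pvPref rest m + ((rest.getD m "").toList.count '\n' : Int) from rfl]
    ring

theorem pvCum_getD : ∀ (es : List String) (s : Int) (t : ℕ), t < es.length →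
    (pvCum s es).getD t 0 = s + pvPref es (t + 1) := by
  intro es
  induction es with
  | nil => intro s t ht; simp at ht
  | cons c rest ih =>
    intro s t ht
    cases t with
    | zero => simp [pvCum, pvPref]
    | succ t =>
      simp only [pvCum, List.getD_cons_succ]
      rw [ih _ t (by simpa using ht), pvPref_cons]
      ring

-- B's while loop computes pvPref
theorem pvAdvance_eq (es : List String) : ∀ (K c i : ℕ), i - c ≤ K → c ≤ i →
    pvAdvance es (pvPref es c) (c : Int) (i : Int) = (pvPref es i, (i : Int)) := by
  intro K
  induction K with
  | zero =>
    intro c i h1 h2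
    have : c = i := by omega
    subst this
    unfold pvAdvance
    simp
  | succ K ih =>
    intro c i h1 h2
    by_cases hci : c = i
    · subst hci; unfold pvAdvance; simp
    · have hlt : c < i := by omega
      unfold pvAdvance
      rw [dif_pos (by exact_mod_cast hlt)]
      have hb : (PySem.Str.count (PySem.List.pyGetD es (c : Int) "") "\n" : Int)
          = ((es.getD c "").toList.count '\n' : Int) := by
        rw [pvStrCount_newline]; simp [PySem.List.pyGetD_natCast]
      rw [hb]
      rw [show pvPref es c + ((es.getD c "").toList.count '\n' : Int) = pvPref es (c + 1) from rfl]
      have := ih (c + 1) i (by omega) (by omega)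
      rw [Nat.cast_add, Nat.cast_one] at this
      exact this

theorem pvTgt_length (es : List String) (el : List (List (List Int))) (k : ℕ) :
    (pvTgt es el k).length = el.length := by
  simp [pvTgt]

theorem pvTgt_getElem (es : List String) (el : List (List (List Int))) (k i : ℕ)
    (hi : i < el.length) :
    (pvTgt es el k)[i]'(by rw [pvTgt_length]; exact hi)
      = if i = 0 ∨ k ≤ i then el[i] else el[i].map (pvUpd (pvPref es i)) := by
  simp [pvTgt]

theorem pvTgt_ext (es : List String) (el : List (List (List Int))) (k k' : ℕ)
    (h : ∀ i, i < el.length → ((i = 0 ∨ k ≤ i) ↔ (i = 0 ∨ k' ≤ i))) :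
    pvTgt es el k = pvTgt es el k' := by
  apply List.ext_getElem (by simp [pvTgt_length])
  intro i h1 h2
  rw [pvTgt_length] at h1
  rw [pvTgt_getElem es el k i h1, pvTgt_getElem es el k' i h1]
  by_cases hc : i = 0 ∨ k ≤ i
  · rw [if_pos hc, if_pos ((h i h1).mp hc)]
  · rw [if_neg hc, if_neg (fun hc' => hc ((h i h1).mpr hc'))]

theorem pvTgt_one (es : List String) (el : List (List (List Int))) :
    pvTgt es el 1 = el := by
  have h : pvTgt es el 1 = el.zipIdx.map Prod.fst := by
    unfold pvTgt
    apply List.map_congr_left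
    intro p _
    rw [if_pos (by omega)]
  rw [h]
  exact List.zipIdx_map_fst 0 el

theorem pvTgt_succ_empty (es : List String) (el : List (List (List Int))) (k : ℕ)
    (hk1 : 1 ≤ k) (hk : k < el.length) (hemp : el[k] = []) :
    pvTgt es el (k + 1) = pvTgt es el k := by
  apply List.ext_getElem (by simp [pvTgt_length])
  intro i h1 h2
  rw [pvTgt_length] at h1
  rw [pvTgt_getElem es el (k + 1) i h1, pvTgt_getElem es el k i h1]
  by_cases hik : i = k
  · subst hik
    rw [if_neg (by omega), if_pos (by omega), hemp]
    simp
  · have hiff : (i = 0 ∨ k + 1 ≤ i) ↔ (i = 0 ∨ k ≤ i) := by omega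
    by_cases hc : i = 0 ∨ k ≤ i
    · rw [if_pos (hiff.mpr hc), if_pos hc]
    · rw [if_neg (fun h => hc (hiff.mp h)), if_neg hc]

theorem pvTgt_set (es : List String) (el : List (List (List Int))) (k : ℕ)
    (hk1 : 1 ≤ k) (hk : k < el.length) :
    (pvTgt es el k).set k (el[k].map (pvUpd (pvPref es k))) = pvTgt es el (k + 1) := by
  apply List.ext_getElem (by simp [pvTgt_length])
  intro i h1 h2
  rw [List.length_set, pvTgt_length] at h1
  rw [List.getElem_set, pvTgt_getElem es el (k + 1) i h1]
  by_cases hik : k = i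
  · subst hik
    rw [if_pos rfl, if_neg (by omega)]
  · rw [if_neg hik]
    rw [pvTgt_getElem es el k i h1]
    have hiff : (i = 0 ∨ k + 1 ≤ i) ↔ (i = 0 ∨ k ≤ i) := by omega
    by_cases hc : i = 0 ∨ k ≤ i
    · rw [if_pos hc, if_pos (hiff.mpr hc)]
    · rw [if_neg hc, if_neg (fun h => hc (hiff.mp h))]

theorem pvFoldB (es : List String) (el : List (List (List Int))) :
    ∀ (K k c : ℕ), el.length - k ≤ K → c ≤ k → 1 ≤ k →
    ((PySem.List.pyRange (k : Int) (el.length : Int) 1).foldl (pvStepB es)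
        (pvPref es c, (c : Int), pvTgt es el k)).2.2 = pvTgt es el el.length := by
  intro K
  induction K with
  | zero =>
    intro k c h1 h2 h3
    rw [PySem.List.pyRange_one_eq_nil (by exact_mod_cast (by omega : el.length ≤ k))]
    simp only [List.foldl_nil]
    exact pvTgt_ext es el k el.length (fun i hi => by omega)
  | succ K ih =>
    intro k c h1 h2 h3
    by_cases hk : el.length ≤ k
    · rw [PySem.List.pyRange_one_eq_nil (by exact_mod_cast hk)]
      simp only [List.foldl_nil]
      exact pvTgt_ext es el k el.length (fun i hi => by omega)
    · have hklt : k < el.length := by omega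
      rw [PySem.List.pyRange_one_cons (by exact_mod_cast hklt)]
      rw [List.foldl_cons]
      have hgroup : PySem.List.pyGetD (pvTgt es el k) (k : Int) ([] : List (List Int)) = el[k] := by
        rw [PySem.List.pyGetD_natCast]
        rw [List.getD_eq_getElem _ _ (by rw [pvTgt_length]; exact hklt)]
        rw [pvTgt_getElem es el k k hklt]
        rw [if_pos (Or.inr le_rfl)]
      by_cases hemp : el[k] = []
      · have hstep : pvStepB es (pvPref es c, (c : Int), pvTgt es el k) (k : Int)
            = (pvPref es c, (c : Int), pvTgt es el k) := by
          unfold pvStepB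
          rw [hgroup, hemp]
          simp
        rw [hstep]
        rw [show pvTgt es el k = pvTgt es el (k + 1) from
          (pvTgt_succ_empty es el k h3 hklt hemp).symm]
        have := ih (k + 1) c (by omega) (by omega) (by omega)
        rw [Nat.cast_add, Nat.cast_one] at this
        exact this
      · have hadv := pvAdvance_eq es k c k (by omega) h2
        have hstep : pvStepB es (pvPref es c, (c : Int), pvTgt es el k) (k : Int)
            = (pvPref es k, (k : Int),
               PySem.List.pySetD (pvTgt es el k) (k : Int) (el[k].map (pvUpd (pvPref es k)))) := by
          unfold pvStepB
          rw [hgroup]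
          rw [if_neg (by simpa [List.isEmpty_iff] using hemp)]
          rw [hadv]
          rfl
        rw [hstep]
        rw [PySem.List.pySetD_natCast]
        rw [pvTgt_set es el k h3 hklt]
        have := ih (k + 1) k (by omega) (by omega) (by omega)
        rw [Nat.cast_add, Nat.cast_one] at this
        exact this

theorem pvASide (el : List (List (List Int))) (es : List String)
    (hpre : Pre_fix_line_numbers el es) :
    fix_line_numbers el es = pvTgt es el el.length := by
  unfold fix_line_numbers
  have hA1 := pvA1 es 0 []
  simp only [List.nil_append] at hA1
  rw [hA1]
  apply List.ext_getElem (by simp [pvTgt_length])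
  intro i h1 h2
  simp only [List.length_map, List.length_zipIdx] at h1
  rw [List.getElem_map, List.getElem_zipIdx]
  rw [pvTgt_getElem es el el.length i h1]
  simp only [Nat.zero_add]
  by_cases hi0 : i = 0
  · subst hi0
    rw [if_pos rfl, if_pos (Or.inl rfl)]
  · rw [if_neg hi0, if_neg (by omega)]
    by_cases hemp : el[i] = []
    · rw [hemp]; simp
    · have hpre' := hpre i h1 (by omega) hemp
      have hoff : PySem.List.pyGetD (pvCum 0 es) ((i : Int) - 1) 0 = pvPref es i := by
        rw [show ((i : Int) - 1) = ((i - 1 : ℕ) : Int) by omega]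
        rw [PySem.List.pyGetD_natCast]
        rw [pvCum_getD es 0 (i - 1) hpre'.1]
        rw [show i - 1 + 1 = i by omega]
        simp
      apply List.map_congr_left
      intro j _
      rw [hoff, pvUpd]

-- ===== VERDICT (by name: the statement is the Claim_ definition above) =====
theorem fix_line_numbers_spec : Claim_equal_fix_line_numbers := by
  unfold Claim_equal_fix_line_numbers
  intro el es _ hpre
  unfold Spec_fix_line_numbers fix_line_numbers_alt
  rw [pvASide el es hpre]
  cases Nat.eq_zero_or_pos el.length with
  | inl h0 =>
    rw [PySem.List.pyRange_one_eq_nil (by omega)]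
    simp only [List.foldl_nil]
    rw [pvTgt_ext es el el.length 1 (fun i hi => by omega)]
    rw [pvTgt_one]
  | inr hpos =>
    have := pvFoldB es el el.length 1 0 (by omega) (by omega) (by omega)
    rw [pvTgt_one] at this
    simpa [pvPref] using this.symm
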